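-- pv_equiv track=rewrite | github.com/wang-h/keyword-extractor | src/keyword_extractor/bert_memory.py | _get_entity_token_indices
-- ===== SOURCE A (Python) =====
-- from typing import List, Dict, Tuple, Optional, Set
--
-- def _get_entity_token_indices(
--
--     text: str,
--     char_spans: List[Tuple[int, int]],
--     offset_mapping: List[Tuple[int, int]]
-- ) -> List[int]:
--     """获取实体在 token 序列中的索引"""
--     token_indices = []
--
--     for start_char, end_char in char_spans:
--         for idx, (tok_start, tok_end) in enumerate(offset_mapping):
--             # 跳过特殊 token ([CLS], [SEP], [PAD])
--             if tok_start == tok_end == 0: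
--                 continue
--             # 如果 token 与实体有重叠
--             if tok_start < end_char and tok_end > start_char:
--                 token_indices.append(idx)
--
--     return sorted(set(token_indices))
-- ===== SOURCE B (Python) =====
-- from typing import List, Tuple
--
-- def _get_entity_token_indices(
--     text: str,
--     char_spans: List[Tuple[int, int]],
--     offset_mapping: List[Tuple[int, int]]
-- ) -> List[int]:
--     """Single pass over tokens: a token index is kept iff the token is not a
--     special (0, 0) token and it overlaps at least one of the char spans.
--     Indices come out already sorted and unique, so no set/sort is needed."""
--     return [
--         idx
--         for idx, (tok_start, tok_end) in enumerate(offset_mapping)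
--         if not (tok_start == tok_end == 0)
--         and any(tok_start < end_char and tok_end > start_char
--                 for start_char, end_char in char_spans)
--     ]
-- ===== Notes on version B (the rewrite author's own statement) =====
-- stated objective: simpler
-- what changed: Replaced the span-outer/token-inner double loop plus the sorted(set(...)) dedup-and-sort postpass by a single comprehension over the tokens that keeps an index iff the token is non-special and overlaps any span (with early-exit any), so indices come out sorted and unique by construction.
import Mathlib
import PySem

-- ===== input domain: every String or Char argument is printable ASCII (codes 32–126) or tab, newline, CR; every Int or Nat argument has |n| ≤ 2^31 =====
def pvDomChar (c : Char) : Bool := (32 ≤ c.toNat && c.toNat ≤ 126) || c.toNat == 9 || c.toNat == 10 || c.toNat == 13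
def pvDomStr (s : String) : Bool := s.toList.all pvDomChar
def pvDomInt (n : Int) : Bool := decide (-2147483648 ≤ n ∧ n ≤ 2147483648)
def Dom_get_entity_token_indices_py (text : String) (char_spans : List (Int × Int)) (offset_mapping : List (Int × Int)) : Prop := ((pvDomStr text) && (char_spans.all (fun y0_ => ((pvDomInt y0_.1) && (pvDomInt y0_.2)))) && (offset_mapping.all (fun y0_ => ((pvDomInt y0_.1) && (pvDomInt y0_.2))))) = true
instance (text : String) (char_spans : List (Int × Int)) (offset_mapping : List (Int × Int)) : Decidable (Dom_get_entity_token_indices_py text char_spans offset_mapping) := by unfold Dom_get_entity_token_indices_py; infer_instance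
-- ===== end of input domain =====

-- B: one pass over the tokens (keep an index iff non-special and overlapping some span), instead of A's span-outer loop plus sorted(set(...)); objective: simpler.

-- ===== PORT A =====
def get_entity_token_indices_py (text : String) (char_spans : List (Int × Int)) (offset_mapping : List (Int × Int)) : List Int :=
  let token_indices : List Int :=
    char_spans.foldl (fun acc sp =>
      (PySem.List.enumerate offset_mapping).foldl (fun acc2 it =>
        if it.2.1 == it.2.2 && it.2.2 == 0 then acc2
        else if it.2.1 < sp.2 && it.2.2 > sp.1 then acc2 ++ [it.1]
        else acc2) acc) []
  PySem.List.sorted (PySem.Set.ofList token_indices) (fun x => x) false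

-- ===== PORT B =====
def get_entity_token_indices_py_alt (text : String) (char_spans : List (Int × Int)) (offset_mapping : List (Int × Int)) : List Int :=
  ((PySem.List.enumerate offset_mapping).filter (fun it =>
    !(it.2.1 == it.2.2 && it.2.2 == 0) &&
    char_spans.any (fun sp => it.2.1 < sp.2 && it.2.2 > sp.1))).map (·.1)

-- ===== PRECONDITION & SPEC =====
def Spec_get_entity_token_indices_py (text : String) (char_spans : List (Int × Int)) (offset_mapping : List (Int × Int)) (out : List Int) : Prop := out = get_entity_token_indices_py_alt text char_spans offset_mapping
instance (text : String) (char_spans : List (Int × Int)) (offset_mapping : List (Int × Int)) (out : List Int) : Decidable (Spec_get_entity_token_indices_py text char_spans offset_mapping out) := by unfold Spec_get_entity_token_indices_py; infer_instance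

-- ===== CLAIM (what is proved, stated in full; the proofs are below) =====
def Claim_equal_get_entity_token_indices_py : Prop := ∀ (text : String) (char_spans : List (Int × Int)) (offset_mapping : List (Int × Int)), Dom_get_entity_token_indices_py text char_spans offset_mapping → Spec_get_entity_token_indices_py text char_spans offset_mapping (get_entity_token_indices_py text char_spans offset_mapping)

-- ===== LEMMAS AND PROOFS =====

-- the keep-condition of B, as a Bool predicate on an enumerated token
def pvKeep (char_spans : List (Int × Int)) (it : Int × Int × Int) : Bool :=
  !(it.2.1 == it.2.2 && it.2.2 == 0) &&
  char_spans.any (fun sp => it.2.1 < sp.2 && it.2.2 > sp.1)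

-- A's inner loop over one span appends exactly the indices of tokens that are
-- non-special and overlap that span
theorem pv_inner (sp : Int × Int) (enum : List (Int × Int × Int)) (acc : List Int) :
    enum.foldl (fun acc2 it =>
        if it.2.1 == it.2.2 && it.2.2 == 0 then acc2
        else if it.2.1 < sp.2 && it.2.2 > sp.1 then acc2 ++ [it.1]
        else acc2) acc
    = acc ++ (enum.filter (fun it =>
        !(it.2.1 == it.2.2 && it.2.2 == 0) && (it.2.1 < sp.2 && it.2.2 > sp.1))).map (·.1) := by
  rw [← PySem.List.foldl_append_if
        (p := fun it : Int × Int × Int =>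
          !(it.2.1 == it.2.2 && it.2.2 == 0) && (it.2.1 < sp.2 && it.2.2 > sp.1))
        (f := (·.1))]
  apply PySem.List.foldl_congr_mem
  intro a it _
  by_cases h1 : (it.2.1 == it.2.2 && it.2.2 == 0) = true <;>
    by_cases h2 : (decide (it.2.1 < sp.2) && decide (it.2.2 > sp.1)) = true <;>
    simp [h1, h2]

-- membership in A's collected list = membership in B's result
theorem pv_mem (char_spans : List (Int × Int)) (enum : List (Int × Int × Int)) (i : Int) :
    (i ∈ char_spans.flatMap (fun sp => (enum.filter (fun it =>
        !(it.2.1 == it.2.2 && it.2.2 == 0) && (it.2.1 < sp.2 && it.2.2 > sp.1))).map (·.1)))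
    ↔ i ∈ (enum.filter (pvKeep char_spans)).map (·.1) := by
  simp only [List.mem_flatMap, List.mem_map, List.mem_filter, pvKeep,
    Bool.and_eq_true, Bool.not_eq_true', List.any_eq_true]
  constructor
  · rintro ⟨sp, hsp, it, ⟨hit, hns, hov⟩, hi⟩
    exact ⟨it, ⟨hit, hns, sp, hsp, hov⟩, hi⟩
  · rintro ⟨it, ⟨hit, hns, sp, hsp, hov⟩, hi⟩
    exact ⟨sp, hsp, it, ⟨hit, hns, hov⟩, hi⟩

-- B's result is strictly increasing
theorem pv_pairwise (char_spans : List (Int × Int)) (offset_mapping : List (Int × Int)) :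
    (((PySem.List.enumerate offset_mapping).filter (pvKeep char_spans)).map (·.1)).Pairwise (· < ·) := by
  exact List.Pairwise.map (fun it : Int × Int × Int => it.1) (fun a b h => h)
    ((PySem.List.pairwise_lt_enumerate offset_mapping 0).sublist List.filter_sublist)

-- ===== VERDICT (by name: the statement is the Claim_ definition above) =====
theorem get_entity_token_indices_py_spec : Claim_equal_get_entity_token_indices_py := by
  intro text char_spans offset_mapping _
  unfold Spec_get_entity_token_indices_py get_entity_token_indices_py get_entity_token_indices_py_alt
  have hL : char_spans.foldl (fun acc sp =>
      (PySem.List.enumerate offset_mapping).foldl (fun acc2 it =>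
        if it.2.1 == it.2.2 && it.2.2 == 0 then acc2
        else if it.2.1 < sp.2 && it.2.2 > sp.1 then acc2 ++ [it.1]
        else acc2) acc) []
      = char_spans.flatMap (fun sp => ((PySem.List.enumerate offset_mapping).filter (fun it =>
          !(it.2.1 == it.2.2 && it.2.2 == 0) && (it.2.1 < sp.2 && it.2.2 > sp.1))).map (·.1)) := by
    have hc := PySem.List.foldl_congr_mem (l := char_spans) (init := ([] : List Int))
      (f := fun acc sp =>
        (PySem.List.enumerate offset_mapping).foldl (fun acc2 it =>
          if it.2.1 == it.2.2 && it.2.2 == 0 then acc2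
          else if it.2.1 < sp.2 && it.2.2 > sp.1 then acc2 ++ [it.1]
          else acc2) acc)
      (g := fun acc sp => acc ++ ((PySem.List.enumerate offset_mapping).filter (fun it =>
        !(it.2.1 == it.2.2 && it.2.2 == 0) && (it.2.1 < sp.2 && it.2.2 > sp.1))).map (·.1))
      (fun acc sp _ => pv_inner sp (PySem.List.enumerate offset_mapping) acc)
    rw [hc, PySem.List.foldl_append_eq_flatMap, List.nil_append]
  simp only [hL]
  have hpw := pv_pairwise char_spans offset_mapping
  have hB : (((PySem.List.enumerate offset_mapping).filter (pvKeep char_spans)).map (·.1)).Nodup :=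
    hpw.imp (fun h => ne_of_lt h)
  have hperm : (((PySem.List.enumerate offset_mapping).filter (pvKeep char_spans)).map (·.1)).Perm
      (PySem.Set.ofList (char_spans.flatMap (fun sp =>
        ((PySem.List.enumerate offset_mapping).filter (fun it =>
          !(it.2.1 == it.2.2 && it.2.2 == 0) && (it.2.1 < sp.2 && it.2.2 > sp.1))).map (·.1)))) := by
    refine (List.perm_ext_iff_of_nodup hB (PySem.Set.nodup_ofList _)).2 ?_
    intro i
    rw [PySem.Set.mem_ofList, pv_mem]
  exact PySem.List.sorted_eq_of_perm_of_pairwise_lt _ _ (fun x => x) hperm hpw
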